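-- pv_equiv track=rewrite | github.com/eden595/geoatacamamio | documentation/reportes/get_report_detalle_r_sonda_dia.py | ordenar_por_mes
-- ===== SOURCE A (Python) =====
-- from collections import OrderedDict
--
-- def ordenar_por_mes(diccionario):
--     # Orden correcto de los meses
--     orden_meses = [
--         'ENERO', 'FEBRERO', 'MARZO', 'ABRIL', 'MAYO', 'JUNIO',
--         'JULIO', 'AGOSTO', 'SEPTIEMBRE', 'OCTUBRE', 'NOVIEMBRE', 'DICIEMBRE'
--     ]
--
--     nuevo_diccionario = {}
--     for anio, datos in diccionario.items():
--         ordenado = OrderedDict()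
--         for mes in orden_meses:
--             if mes in datos:
--                 ordenado[mes] = datos[mes]
--         if anio in datos:
--             ordenado[anio] = datos[anio]
--         nuevo_diccionario[anio] = ordenado
--
--     return nuevo_diccionario
-- ===== SOURCE B (Python) =====
-- from collections import OrderedDict
--
-- _MESES = [
--     'ENERO', 'FEBRERO', 'MARZO', 'ABRIL', 'MAYO', 'JUNIO',
--     'JULIO', 'AGOSTO', 'SEPTIEMBRE', 'OCTUBRE', 'NOVIEMBRE', 'DICIEMBRE'
-- ]
-- _RANK = {mes: i for i, mes in enumerate(_MESES)}
--
--
-- def _reordenar(anio, datos):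
--     # sort the data's own month keys by the precomputed rank, build the pair
--     # list directly, and append the year entry only when it is not a month
--     claves = sorted((k for k in datos if k in _RANK), key=_RANK.get)
--     pares = [(k, datos[k]) for k in claves]
--     if anio in datos and anio not in _RANK:
--         pares.append((anio, datos[anio]))
--     return OrderedDict(pares)
--
--
-- def ordenar_por_mes(diccionario):
--     return {anio: _reordenar(anio, datos) for anio, datos in diccionario.items()}
-- ===== Notes on version B (the rewrite author's own statement) =====
-- stated objective: alternative
-- what changed: Instead of scanning the fixed 12-month list and mutating an OrderedDict month by month (plus a blind reassignment of the year key), B precomputes a month->index rank dict, sorts the data's own month keys by rank, builds the ordered pair list in one shot, and appends the year entry only when it is not itself a month name.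
import Mathlib
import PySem

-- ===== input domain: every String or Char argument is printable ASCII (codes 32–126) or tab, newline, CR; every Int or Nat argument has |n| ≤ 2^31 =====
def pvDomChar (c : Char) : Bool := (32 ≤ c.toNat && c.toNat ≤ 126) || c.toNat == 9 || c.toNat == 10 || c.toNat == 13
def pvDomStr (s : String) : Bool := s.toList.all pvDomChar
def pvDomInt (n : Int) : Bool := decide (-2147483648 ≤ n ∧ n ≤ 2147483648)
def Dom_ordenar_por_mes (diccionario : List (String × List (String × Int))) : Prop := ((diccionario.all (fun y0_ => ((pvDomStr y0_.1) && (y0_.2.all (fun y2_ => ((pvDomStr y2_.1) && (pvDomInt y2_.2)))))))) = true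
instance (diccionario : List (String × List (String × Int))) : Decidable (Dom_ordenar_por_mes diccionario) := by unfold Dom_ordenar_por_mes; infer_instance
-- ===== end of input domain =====

-- B replaces A's per-year scan of the fixed 12-month list mutating an OrderedDict with:
-- sort the data's own month keys by a precomputed month->index rank, build the pair list
-- in one shot, and append the year pair only when it is not a month (alternative, same cost class).
-- Incoming Python dicts are embedded via PySem.Dict.ofList (exact Python dict construction).


-- ===== PORT A =====
-- A's orden_meses literal
def pvOrdenMeses : List String :=
  ["ENERO", "FEBRERO", "MARZO", "ABRIL", "MAYO", "JUNIO",
   "JULIO", "AGOSTO", "SEPTIEMBRE", "OCTUBRE", "NOVIEMBRE", "DICIEMBRE"]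

def ordenar_por_mes (diccionario : List (String × List (String × Int))) : List (String × List (String × Int)) :=
  (diccionario.foldl
    (fun nuevo par =>
      let anio := par.1
      let datos : PySem.Dict String Int := PySem.Dict.ofList par.2
      let ordenado : PySem.Dict String Int :=
        pvOrdenMeses.foldl
          (fun o mes => if datos.contains mes then o.insert mes (datos.getD mes 0) else o)
          PySem.Dict.empty
      let ordenado2 := if datos.contains anio then ordenado.insert anio (datos.getD anio 0) else ordenado
      nuevo.insert anio ordenado2.items)
    (PySem.Dict.empty : PySem.Dict String (List (String × Int)))).items

-- ===== PORT B =====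
-- B's _MESES literal
def pvMesesB : List String :=
  ["ENERO", "FEBRERO", "MARZO", "ABRIL", "MAYO", "JUNIO",
   "JULIO", "AGOSTO", "SEPTIEMBRE", "OCTUBRE", "NOVIEMBRE", "DICIEMBRE"]

-- _RANK = {mes: i for i, mes in enumerate(_MESES)}
def pvRank : PySem.Dict String Int :=
  (PySem.List.enumerate pvMesesB 0).foldl (fun d p => d.insert p.2 p.1) PySem.Dict.empty

-- _reordenar(anio, datos); the sort key _RANK.get is ported as getD _ 0, exact on the
-- filtered keys (all of which are in _RANK)
def pvReordenar (anio : String) (datos : List (String × Int)) : List (String × Int) :=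
  let d : PySem.Dict String Int := PySem.Dict.ofList datos
  let claves : List String :=
    PySem.List.sorted (d.keys.filter (fun k => pvRank.contains k)) (fun k => pvRank.getD k 0)
  let pares : List (String × Int) := claves.map (fun k => (k, d.getD k 0))
  pares ++ (if d.contains anio && !(pvRank.contains anio) then [(anio, d.getD anio 0)] else [])

def ordenar_por_mes_alt (diccionario : List (String × List (String × Int))) : List (String × List (String × Int)) :=
  (diccionario.foldl
    (fun nuevo par =>
      nuevo.insert par.1 (PySem.Dict.ofList (pvReordenar par.1 par.2)).items)
    (PySem.Dict.empty : PySem.Dict String (List (String × Int)))).items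

-- ===== PRECONDITION & SPEC =====
def Spec_ordenar_por_mes (diccionario : List (String × List (String × Int))) (out : List (String × List (String × Int))) : Prop := out = ordenar_por_mes_alt diccionario
instance (diccionario : List (String × List (String × Int))) (out : List (String × List (String × Int))) : Decidable (Spec_ordenar_por_mes diccionario out) := by unfold Spec_ordenar_por_mes; infer_instance

-- ===== CLAIM (what is proved, stated in full; the proofs are below) =====
def Claim_equal_ordenar_por_mes : Prop := ∀ (diccionario : List (String × List (String × Int))), Dom_ordenar_por_mes diccionario → Spec_ordenar_por_mes diccionario (ordenar_por_mes diccionario)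

-- ===== LEMMAS AND PROOFS =====

lemma pvRank_contains (k : String) : pvRank.contains k = pvOrdenMeses.contains k := by
  have h : pvRank = PySem.Dict.mk
      [("ENERO", 0), ("FEBRERO", 1), ("MARZO", 2), ("ABRIL", 3), ("MAYO", 4), ("JUNIO", 5),
       ("JULIO", 6), ("AGOSTO", 7), ("SEPTIEMBRE", 8), ("OCTUBRE", 9), ("NOVIEMBRE", 10), ("DICIEMBRE", 11)] := by
    decide
  rw [h]
  simp [PySem.Dict.contains, pvOrdenMeses, BEq.comm, Bool.beq_eq_decide_eq]

lemma pvMeses_nodup : pvOrdenMeses.Nodup := by decide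

lemma pvMeses_pairwise : pvOrdenMeses.Pairwise (fun a b => pvRank.getD a 0 < pvRank.getD b 0) := by
  decide

-- PySem.Dict.ofList is the dict-construction fold (definitional)
lemma dict_ofList_eq_foldl (ps : List (String × Int)) :
    PySem.Dict.ofList ps = ps.foldl (fun d p => d.insert p.1 p.2) PySem.Dict.empty := rfl

-- dict(pairs) on a list with pairwise-distinct keys keeps it as-is
lemma items_ofList_of_nodup (ps : List (String × Int)) (h : (ps.map Prod.fst).Nodup) :
    (PySem.Dict.ofList ps).items = ps := by
  rw [dict_ofList_eq_foldl]
  have := PySem.Dict.items_foldl_insert_fresh (l := ps) (k := Prod.fst) (v := Prod.snd)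
    (d := (PySem.Dict.empty : PySem.Dict String Int)) (by simp) h
  simpa using this

-- B's sorted month-key list IS A's traversal order: the months present in datos, in month order
lemma claves_eq (d : PySem.Dict String Int) (hnd : d.keys.Nodup) :
    PySem.List.sorted (d.keys.filter (fun k => pvRank.contains k)) (fun k => pvRank.getD k 0)
      = pvOrdenMeses.filter (fun m => d.contains m) := by
  apply PySem.List.sorted_eq_of_perm_of_pairwise_lt
  · rw [List.perm_ext_iff_of_nodup (pvMeses_nodup.filter _) (hnd.filter _)]
    intro x
    simp only [List.mem_filter, pvRank_contains, List.contains_iff_mem,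
      ← PySem.Dict.contains_iff_mem_keys]
    tauto
  · exact pvMeses_pairwise.sublist List.filter_sublist

-- A's inner month loop, characterised: its items are the present months paired with their values
lemma ordenadoA_items (d : PySem.Dict String Int) :
    (pvOrdenMeses.foldl
        (fun o mes => if d.contains mes then o.insert mes (d.getD mes 0) else o)
        PySem.Dict.empty).items
      = (pvOrdenMeses.filter (fun m => d.contains m)).map (fun k => (k, d.getD k 0)) := by
  rw [PySem.List.foldl_if_eq_foldl_filter]
  have := PySem.Dict.items_foldl_insert_fresh (l := pvOrdenMeses.filter (fun m => d.contains m))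
    (k := fun x => x) (v := fun x => d.getD x 0)
    (d := (PySem.Dict.empty : PySem.Dict String Int)) (by simp)
    (by simpa using pvMeses_nodup.filter (fun m => d.contains m))
  simpa using this

-- the per-year results of the two ports coincide
lemma inner_eq (anio : String) (datos : List (String × Int)) :
    (if (PySem.Dict.ofList datos).contains anio then
        (pvOrdenMeses.foldl
          (fun o mes => if (PySem.Dict.ofList datos).contains mes then o.insert mes ((PySem.Dict.ofList datos).getD mes 0) else o)
          PySem.Dict.empty).insert anio ((PySem.Dict.ofList datos).getD anio 0)
      else
        pvOrdenMeses.foldl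
          (fun o mes => if (PySem.Dict.ofList datos).contains mes then o.insert mes ((PySem.Dict.ofList datos).getD mes 0) else o)
          PySem.Dict.empty).items
      = (PySem.Dict.ofList (pvReordenar anio datos)).items := by
  set d : PySem.Dict String Int := PySem.Dict.ofList datos with hd
  have hnd : d.keys.Nodup := by rw [hd]; exact PySem.Dict.nodup_keys_ofList datos
  have hOrd := ordenadoA_items d
  set ord : PySem.Dict String Int :=
    pvOrdenMeses.foldl (fun o mes => if d.contains mes then o.insert mes (d.getD mes 0) else o)
      PySem.Dict.empty with hord
  have hcompid : (Prod.fst ∘ fun k : String => (k, d.getD k 0)) = id := rfl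
  have hkeys : ord.keys = pvOrdenMeses.filter (fun m => d.contains m) := by
    simp only [PySem.Dict.keys, hOrd, List.map_map]
    rw [hcompid, List.map_id]
  have hcont : ∀ x : String, (ord.contains x = true) = ((x ∈ pvOrdenMeses) ∧ d.contains x = true) := by
    intro x
    rw [eq_iff_iff, PySem.Dict.contains_iff_mem_keys, hkeys, List.mem_filter]
  have hpares : pvReordenar anio datos
      = (pvOrdenMeses.filter (fun m => d.contains m)).map (fun k => (k, d.getD k 0))
        ++ (if d.contains anio && !(pvRank.contains anio) then [(anio, d.getD anio 0)] else []) := by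
    simp only [pvReordenar]
    rw [← hd, claves_eq d hnd]
  have hkeysnd : ((pvReordenar anio datos).map Prod.fst).Nodup := by
    rw [hpares]
    by_cases hm : (d.contains anio && !(pvRank.contains anio)) = true
    · have hnotmem : anio ∉ pvOrdenMeses := by
        rcases Bool.and_eq_true_iff.mp hm with ⟨_, hr⟩
        rw [Bool.not_eq_eq_eq_not, Bool.not_true, pvRank_contains] at hr
        intro hmem
        have hmem' := List.contains_iff_mem.mpr hmem
        rw [hr] at hmem'
        exact Bool.false_ne_true hmem'
      rw [if_pos hm, List.map_append, List.map_map, hcompid, List.map_id]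
      simp only [List.map_cons, List.map_nil]
      rw [List.nodup_append]
      refine ⟨pvMeses_nodup.filter _, List.nodup_singleton _, ?_⟩
      intro x hx y hy
      rw [List.mem_singleton] at hy
      subst hy
      exact fun e => hnotmem (e ▸ (List.mem_filter.mp hx).1)
    · rw [if_neg hm, List.append_nil, List.map_map, hcompid, List.map_id]
      exact pvMeses_nodup.filter _
  rw [items_ofList_of_nodup _ hkeysnd, hpares]
  by_cases hca : d.contains anio = true
  · by_cases hmon : anio ∈ pvOrdenMeses
    · -- anio is a month already inserted with the same value: overwrite is a no-op, B appends nothing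
      have hc : ord.contains anio = true := by rw [hcont]; exact ⟨hmon, hca⟩
      have hrk : pvRank.contains anio = true := by
        rw [pvRank_contains]; exact List.contains_iff_mem.mpr hmon
      have hb : (d.contains anio && !(pvRank.contains anio)) = false := by rw [hrk]; simp
      rw [if_pos hca, hb, if_neg Bool.false_ne_true, List.append_nil]
      rw [PySem.Dict.items_insert_of_contains _ _ hc, hOrd, List.map_map]
      apply List.map_congr_left
      intro k hk
      by_cases hk2 : k = anio <;> simp [Function.comp, hk2]
    · -- anio not a month: both append the year pair at the end
      have hc : ord.contains anio = false := by
        rw [Bool.eq_false_iff]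
        intro h
        exact hmon ((cast (hcont anio) h).1)
      have hrk : pvRank.contains anio = false := by
        rw [Bool.eq_false_iff]
        intro h
        rw [pvRank_contains] at h
        exact hmon (List.contains_iff_mem.mp h)
      have hb : (d.contains anio && !(pvRank.contains anio)) = true := by rw [hca, hrk]; rfl
      rw [if_pos hca, hb, if_pos rfl]
      rw [PySem.Dict.items_insert_of_not_contains _ _ hc, hOrd]
  · -- anio absent from datos: neither side adds it
    have hbf : d.contains anio = false := Bool.eq_false_iff.mpr hca
    have hb : (d.contains anio && !(pvRank.contains anio)) = false := by rw [hbf]; rfl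
    rw [if_neg hca, hb, if_neg Bool.false_ne_true, List.append_nil]
    exact hOrd

-- ===== VERDICT (by name: the statement is the Claim_ definition above) =====
theorem ordenar_por_mes_spec : Claim_equal_ordenar_por_mes := by
  intro dic _
  unfold Spec_ordenar_por_mes ordenar_por_mes ordenar_por_mes_alt
  simp only [inner_eq]
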